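-- pv_equiv track=rewrite | github.com/yezhang4528/USACO | training/chapter1/sec_1_4/barn_repair/barn1.py | getSplitPair
-- ===== SOURCE A (Python) =====
-- def getSplitPair(cowList, totalGroups):
--     indexDistPairList = []
--     pos = 0
--     distance = 0
--     for i in range(cowList[0], cowList[-1]+ 1):
--         if i == cowList[pos]:
--             pos = pos + 1
--             if distance > 0:
--                 indexDistPairList.append((distance, (i-distance)))
--                 distance = 0
--             continue
--         else:
--             distance = distance + 1
--     # sort list by distance, get the max distance pairs
--     sortedList = sorted(indexDistPairList, key = lambda x:x[0])
--
--     # split number = totalGroups - 1, that's the number of pairs returns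
--     if len(sortedList) <= totalGroups - 1:
--         return sortedList
--     else:
--         return sortedList[-(totalGroups-1):]
-- ===== SOURCE B (Python) =====
-- def getSplitPair(cowList, totalGroups):
--     # Event-driven sweep: jump from one occupied stall to the next, recording
--     # each stretch of empty stalls, instead of stepping through every stall index.
--     last = cowList[-1]
--     i = cowList[0]  # sweep position: first stall not yet accounted for
--     pairs = []
--     for stall in cowList:
--         if stall < i or stall > last:
--             break  # stall outside the remaining sweep range: the sweep is done
--         if stall > i:
--             pairs.append((stall - i, i))
--         i = stall + 1
--     pairs.sort(key=lambda x: x[0])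
--     if len(pairs) <= totalGroups - 1:
--         return pairs
--     return pairs[-(totalGroups - 1):]
-- ===== Notes on version B (the rewrite author's own statement) =====
-- stated objective: faster
-- what changed: B replaces A's stall-by-stall scan of range(cowList[0], cowList[-1]+1) with an event-driven sweep that jumps from one occupied stall to the next, recording each empty stretch as it is skipped; sort and final slice are unchanged.
import Mathlib
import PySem

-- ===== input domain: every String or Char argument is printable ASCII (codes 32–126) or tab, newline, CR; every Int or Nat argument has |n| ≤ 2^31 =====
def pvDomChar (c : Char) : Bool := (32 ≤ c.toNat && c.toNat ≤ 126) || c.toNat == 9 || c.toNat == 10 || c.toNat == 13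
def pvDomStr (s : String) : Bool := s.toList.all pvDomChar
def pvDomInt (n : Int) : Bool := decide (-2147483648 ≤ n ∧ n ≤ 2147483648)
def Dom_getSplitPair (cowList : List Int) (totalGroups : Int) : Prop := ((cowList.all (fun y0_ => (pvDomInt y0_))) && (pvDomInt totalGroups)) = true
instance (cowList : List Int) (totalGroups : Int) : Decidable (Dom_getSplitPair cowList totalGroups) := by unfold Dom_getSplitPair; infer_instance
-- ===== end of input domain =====

-- B replaces A's stall-by-stall scan of range(cowList[0], cowList[-1]+1) by an
-- event-driven sweep that jumps from one occupied stall to the next (objective: faster, asymptotically).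


-- ===== PORT A =====
-- one iteration of A's for-loop; state = (indexDistPairList, pos, distance)
def aStep (cowList : List Int) (st : List (Int × Int) × Int × Int) (i : Int) :
    List (Int × Int) × Int × Int :=
  if PySem.List.pyGet? cowList st.2.1 = some i then
    if st.2.2 > 0 then (st.1 ++ [(st.2.2, i - st.2.2)], st.2.1 + 1, 0)
    else (st.1, st.2.1 + 1, st.2.2)
  else (st.1, st.2.1, st.2.2 + 1)

-- A's body once cowList[0] and cowList[-1] have been read
def getSplitPairCore (cowList : List Int) (c0 clast totalGroups : Int) : List (Int × Int) :=
  let st := (PySem.List.pyRange c0 (clast + 1) 1).foldl (aStep cowList) ([], 0, 0)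
  let sortedList := PySem.List.sorted st.1 (fun x => x.1)
  if (sortedList.length : Int) ≤ totalGroups - 1 then sortedList
  else PySem.List.slice sortedList (some (-(totalGroups - 1))) none

def getSplitPair (cowList : List Int) (totalGroups : Int) : List (Int × Int) :=
  match PySem.List.pyGet? cowList 0, PySem.List.pyGet? cowList (-1) with
  | some c0, some clast => getSplitPairCore cowList c0 clast totalGroups
  | _, _ => []  -- unreachable under Pre_ (cowList ≠ []): Python raises IndexError

-- ===== PORT B =====
-- Source B's for-loop with break: i is the sweep position, a stall outside the
-- remaining sweep range ends the sweep
def sweepGaps (last : Int) (i : Int) : List Int → List (Int × Int)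
  | [] => []
  | stall :: rest =>
    if stall < i ∨ stall > last then []
    else (if stall > i then [(stall - i, i)] else []) ++ sweepGaps last (stall + 1) rest

def getSplitPair_alt (cowList : List Int) (totalGroups : Int) : List (Int × Int) :=
  match cowList with
  | [] => []  -- Source B raises IndexError here; outside Pre_
  | c0 :: rest =>
    let pairs := sweepGaps ((c0 :: rest).getLast (by simp)) c0 (c0 :: rest)
    let sortedp := PySem.List.sorted pairs (fun x => x.1)
    if (sortedp.length : Int) ≤ totalGroups - 1 then sortedp
    else PySem.List.slice sortedp (some (-(totalGroups - 1))) none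

-- ===== PRECONDITION & SPEC =====
-- Pre_ excludes only the empty cowList, on which A raises IndexError (cowList[0]).
def Pre_getSplitPair (cowList : List Int) (totalGroups : Int) : Prop := cowList ≠ []
instance (cowList : List Int) (totalGroups : Int) : Decidable (Pre_getSplitPair cowList totalGroups) := by unfold Pre_getSplitPair; infer_instance
def pvWitness_getSplitPair : List Int × Int := ([1, 4, 5, 9], 2)

def Spec_getSplitPair (cowList : List Int) (totalGroups : Int) (out : List (Int × Int)) : Prop := out = getSplitPair_alt cowList totalGroups
instance (cowList : List Int) (totalGroups : Int) (out : List (Int × Int)) : Decidable (Spec_getSplitPair cowList totalGroups out) := by unfold Spec_getSplitPair; infer_instance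

-- ===== CLAIM (what is proved, stated in full; the proofs are below) =====
def Claim_equal_getSplitPair : Prop := ∀ (cowList : List Int) (totalGroups : Int), Dom_getSplitPair cowList totalGroups → Pre_getSplitPair cowList totalGroups → Spec_getSplitPair cowList totalGroups (getSplitPair cowList totalGroups)

-- ===== LEMMAS AND PROOFS =====

-- once A's scan can no longer match cowList[pos], the loop only accumulates distance
theorem aStep_stall (L : List Int) (r : List Int) (acc : List (Int × Int)) (pos d : Int)
    (h : ∀ i ∈ r, PySem.List.pyGet? L pos ≠ some i) :
    r.foldl (aStep L) (acc, pos, d) = (acc, pos, d + r.length) := by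
  induction r generalizing d with
  | nil => simp
  | cons i r ih =>
    have hi : PySem.List.pyGet? L pos ≠ some i := h i (by simp)
    simp only [List.foldl_cons, aStep, hi, if_false]
    rw [ih (d + 1) (fun j hj => h j (List.mem_cons_of_mem _ hj))]
    have harith : d + 1 + (r.length : Int) = d + ((r.length : Int) + 1) := by ring
    simp only [List.length_cons]
    push_cast
    rw [harith]

-- main invariant: A's scan from prev+1 with pos pointing at suffix suf equals B's sweep
theorem aScan_eq_sweepGaps (L : List Int) (suf : List Int) :
    ∀ (p : Nat) (acc : List (Int × Int)) (prev last : Int),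
    L.drop p = suf → prev ≤ last →
    ((PySem.List.pyRange (prev + 1) (last + 1) 1).foldl (aStep L) (acc, (p : Int), 0)).1
      = acc ++ sweepGaps last (prev + 1) suf := by
  induction suf with
  | nil =>
    intro p acc prev last hdrop _
    have hp : L[p]? = none := by
      rw [← List.head?_drop, hdrop]; rfl
    rw [aStep_stall L _ acc _ 0 (by simp [PySem.List.pyGet?_natCast, hp])]
    simp [sweepGaps]
  | cons c rest ih =>
    intro p acc prev last hdrop hle
    have hc : PySem.List.pyGet? L (p : Int) = some c := by
      rw [PySem.List.pyGet?_natCast, ← List.head?_drop, hdrop]; rfl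
    by_cases hbad : c < prev + 1 ∨ c > last
    · rw [aStep_stall L _ acc _ 0]
      · simp only [sweepGaps, hbad, if_true, List.append_nil]
      · intro i hi hsome
        rw [hc] at hsome
        have := (PySem.List.mem_pyRange_one).mp hi
        have : c = i := by injection hsome
        omega
    · rw [not_or, not_lt, not_lt] at hbad
      obtain ⟨h1, h2⟩ := hbad
      rw [PySem.List.pyRange_one_append (prev + 1) (c + 1) (last + 1) (by omega) (by omega),
          PySem.List.pyRange_one_succ_right (by omega : prev + 1 ≤ c),
          List.foldl_append, List.foldl_append]
      rw [aStep_stall L _ acc _ 0 (by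
        intro i hi hsome
        rw [hc] at hsome
        have := (PySem.List.mem_pyRange_one).mp hi
        have : c = i := by injection hsome
        omega)]
      have hlen : ((PySem.List.pyRange (prev + 1) c 1).length : Int) = c - prev - 1 := by
        rw [PySem.List.length_pyRange_one]; omega
      have hdrop' : L.drop (p + 1) = rest := by
        rw [← List.tail_drop, hdrop]; rfl
      simp only [List.foldl_cons, List.foldl_nil, aStep, hc, if_true, zero_add, hlen]
      have hcast : (p : Int) + 1 = ((p + 1 : Nat) : Int) := by push_cast; ring
      have hsg : sweepGaps last (prev + 1) (c :: rest)
          = (if c > prev + 1 then [(c - (prev + 1), prev + 1)] else [])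
              ++ sweepGaps last (c + 1) rest := by
        simp only [sweepGaps]
        have : ¬ (c < prev + 1 ∨ c > last) := by omega
        simp only [this, if_false]
      by_cases hgap : c - prev - 1 > 0
      · simp only [hgap, if_true]
        rw [hcast, ih (p + 1) _ c last hdrop' h2, hsg]
        have hg' : c > prev + 1 := by omega
        simp only [hg', if_true]
        have : c - (c - prev - 1) = prev + 1 := by ring
        have h2' : c - prev - 1 = c - (prev + 1) := by ring
        rw [this, h2', List.append_assoc]
      · simp only [hgap, if_false]
        have hz : c - prev - 1 = 0 := by omega
        rw [hz, hcast, ih (p + 1) _ c last hdrop' h2, hsg]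
        have hg' : ¬ (c > prev + 1) := by omega
        simp only [hg', if_false, List.nil_append]

-- A's whole loop produces exactly B's sweep over the full cow list
theorem pairs_eq (c0 : Int) (rest : List Int) :
    ((PySem.List.pyRange c0 ((c0 :: rest).getLast (by simp) + 1) 1).foldl
        (aStep (c0 :: rest)) ([], 0, 0)).1
      = sweepGaps ((c0 :: rest).getLast (by simp)) c0 (c0 :: rest) := by
  set last := (c0 :: rest).getLast (by simp) with hlast
  by_cases hord : c0 ≤ last
  · rw [PySem.List.pyRange_one_cons (by omega : c0 < last + 1)]
    have hc0 : PySem.List.pyGet? (c0 :: rest) (0 : Int) = some c0 :=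
      PySem.List.pyGet?_zero_cons c0 rest
    simp only [List.foldl_cons, aStep, hc0, if_true]
    have : ¬ ((0 : Int) > 0) := by omega
    simp only [this, if_false]
    have h01 : (0 : Int) + 1 = ((1 : Nat) : Int) := by norm_num
    rw [h01, aScan_eq_sweepGaps (c0 :: rest) rest 1 [] c0 last rfl hord]
    rw [List.nil_append]
    have hc0bad : ¬ (c0 < c0 ∨ c0 > last) := by omega
    have hc0gap : ¬ (c0 > c0) := by omega
    conv_rhs => rw [sweepGaps]
    rw [if_neg hc0bad, if_neg hc0gap, List.nil_append]
  · rw [PySem.List.pyRange_one_eq_nil (by omega : last + 1 ≤ c0)]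
    simp only [List.foldl_nil]
    have hbad : c0 < c0 ∨ c0 > last := by omega
    conv_rhs => rw [sweepGaps]
    rw [if_pos hbad]

-- ===== VERDICT (by name: the statement is the Claim_ definition above) =====
theorem getSplitPair_spec : Claim_equal_getSplitPair := by
  intro cowList totalGroups _ hpre
  unfold Spec_getSplitPair
  obtain ⟨c0, rest, rfl⟩ : ∃ c0 rest, cowList = c0 :: rest := by
    cases cowList with
    | nil => exact absurd rfl hpre
    | cons a l => exact ⟨a, l, rfl⟩
  have hgetl : PySem.List.pyGet? (c0 :: rest) (-1 : Int)
      = some ((c0 :: rest).getLast (by simp)) := by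
    rw [PySem.List.pyGet?_neg_one, List.getLast?_eq_some_getLast]
  have hA : getSplitPair (c0 :: rest) totalGroups
      = getSplitPairCore (c0 :: rest) c0 ((c0 :: rest).getLast (by simp)) totalGroups := by
    unfold getSplitPair
    rw [PySem.List.pyGet?_zero_cons, hgetl]
  rw [hA]
  simp only [getSplitPairCore, getSplitPair_alt]
  rw [pairs_eq c0 rest]
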